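-- pv_equiv track=rewrite | github.com/BrokenSpaghetti02/HealthHive | backend/routes/patient_routes.py | normalize_conditions
-- ===== SOURCE A (Python) =====
-- from typing import List, Optional
--
-- def normalize_conditions(conditions: List[str]) -> List[str]:
--     """Normalize condition labels to HTN/DM tags for UI compatibility"""
--     normalized = set()
--     for condition in conditions or []:
--         if condition in ["Hypertension", "HTN"]:
--             normalized.add("HTN")
--         if condition in ["Diabetes", "Diabetes Mellitus Type 2", "DM"]:
--             normalized.add("DM")
--     return sorted(normalized)
-- ===== SOURCE B (Python) =====
-- _TAG_BITS = {
--     "Hypertension": 1, "HTN": 1,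
--     "Diabetes": 2, "Diabetes Mellitus Type 2": 2, "DM": 2,
-- }
-- _OUT = [[], ["HTN"], ["DM"], ["DM", "HTN"]]
--
-- def normalize_conditions(conditions):
--     """Normalize condition labels to HTN/DM tags for UI compatibility"""
--     mask = 0
--     for condition in conditions or []:
--         mask |= _TAG_BITS.get(condition, 0)
--         if mask == 3:
--             break
--     return list(_OUT[mask])
-- ===== Notes on version B (the rewrite author's own statement) =====
-- stated objective: alternative
-- what changed: Replaces the set-accumulate-then-sort algorithm by a bitmask automaton: one alias-to-bit dictionary, a loop that ORs bits with early exit once both bits are set, and a direct four-entry table lookup producing the already-sorted answer (no set, no branch per tag, no final sort).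
import Mathlib
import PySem

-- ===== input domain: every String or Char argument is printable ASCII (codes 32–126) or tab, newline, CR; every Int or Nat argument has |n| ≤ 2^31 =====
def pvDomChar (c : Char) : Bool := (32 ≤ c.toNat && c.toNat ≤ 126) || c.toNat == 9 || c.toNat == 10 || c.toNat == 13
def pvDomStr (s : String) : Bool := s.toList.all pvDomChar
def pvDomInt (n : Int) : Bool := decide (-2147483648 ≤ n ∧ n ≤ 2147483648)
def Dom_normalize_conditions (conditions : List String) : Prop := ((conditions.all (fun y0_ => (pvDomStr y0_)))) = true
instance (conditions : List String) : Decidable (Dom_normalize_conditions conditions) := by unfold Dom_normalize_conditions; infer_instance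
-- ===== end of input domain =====

-- B replaces A's set-accumulate-then-sort by a bitmask automaton (alias→bit dict, OR with early exit, table lookup); return-value equivalence.
-- ===== PORT A =====
def normalize_conditions (conditions : List String) : List String :=
  let normalized := conditions.foldl
    (fun s condition =>
      let s := if condition == "Hypertension" || condition == "HTN" then PySem.Set.add s "HTN" else s
      if condition == "Diabetes" || condition == "Diabetes Mellitus Type 2" || condition == "DM" then
        PySem.Set.add s "DM"
      else s)
    PySem.Set.empty
  PySem.List.sorted normalized (fun x => x) false

-- ===== PORT B =====
-- module-level dict literal _TAG_BITS (association list in insertion order)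
def pvTagBits : PySem.Dict String Int :=
  PySem.Dict.ofList [("Hypertension", 1), ("HTN", 1), ("Diabetes", 2), ("Diabetes Mellitus Type 2", 2), ("DM", 2)]

-- module-level table _OUT
def pvOUT : List (List String) := [[], ["HTN"], ["DM"], ["DM", "HTN"]]

-- Source B's for-loop with its early 'break' once mask == 3
def pvAltLoop : List String → Int → Int
  | [], mask => mask
  | condition :: rest, mask =>
      let mask := PySem.Int.bor mask (PySem.Dict.getD pvTagBits condition 0)
      if mask == 3 then mask else pvAltLoop rest mask

def normalize_conditions_alt (conditions : List String) : List String :=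
  -- _OUT[mask]: mask is always in [0,3] (proved below), so pyGet? is always some; .getD [] only discharges the Option
  (PySem.List.pyGet? pvOUT (pvAltLoop conditions 0)).getD []

-- ===== PRECONDITION & SPEC =====
def Spec_normalize_conditions (conditions : List String) (out : List String) : Prop := out = normalize_conditions_alt conditions
instance (conditions : List String) (out : List String) : Decidable (Spec_normalize_conditions conditions out) := by unfold Spec_normalize_conditions; infer_instance

-- ===== CLAIM (what is proved, stated in full; the proofs are below) =====
def Claim_equal_normalize_conditions : Prop := ∀ (conditions : List String), Dom_normalize_conditions conditions → Spec_normalize_conditions conditions (normalize_conditions conditions)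

-- ===== LEMMAS AND PROOFS =====

-- the step function of A's loop body, named so the lemmas can speak about it (definitionally equal to the inline lambda in the port)
def pvStepA (s : List String) (condition : String) : List String :=
  let s := if condition == "Hypertension" || condition == "HTN" then PySem.Set.add s "HTN" else s
  if condition == "Diabetes" || condition == "Diabetes Mellitus Type 2" || condition == "DM" then
    PySem.Set.add s "DM"
  else s

-- the four possible outputs, keyed by (has DM, has HTN); already in sorted order since "DM" < "HTN"
def pvOut (bD bH : Bool) : List String :=
  (if bD then ["DM"] else []) ++ (if bH then ["HTN"] else [])

def pvIsH (c : String) : Bool := c == "Hypertension" || c == "HTN"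
def pvIsD (c : String) : Bool := c == "Diabetes" || c == "Diabetes Mellitus Type 2" || c == "DM"

-- A's accumulator only ever takes one of five literal values
def pvS5 (s : List String) : Prop :=
  s = [] ∨ s = ["HTN"] ∨ s = ["DM"] ∨ s = ["HTN", "DM"] ∨ s = ["DM", "HTN"]

theorem pv_fold_sorted : ∀ (l : List String) (s : List String), pvS5 s →
    PySem.List.sorted (l.foldl pvStepA s) (fun x => x) false
      = pvOut (s.contains "DM" || l.any pvIsD) (s.contains "HTN" || l.any pvIsH) := by
  intro l
  induction l with
  | nil =>
    intro s hs
    rcases hs with rfl | rfl | rfl | rfl | rfl <;> simp only [List.foldl_nil]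
    · simp [PySem.List.sorted_eq_nil_iff, pvOut]
    · rw [PySem.List.sorted_eq_self_of_pairwise _ _ (by simp)]; simp [pvOut]
    · rw [PySem.List.sorted_eq_self_of_pairwise _ _ (by simp)]; simp [pvOut]
    · rw [PySem.List.sorted_eq_of_perm_of_pairwise_lt _ ["DM", "HTN"] _ (List.Perm.swap _ _ _) (by simp; decide)]
      simp [pvOut]
    · rw [PySem.List.sorted_eq_self_of_pairwise _ _ (by simp; decide)]; simp [pvOut]
  | cons c t ih =>
    intro s hs
    have hstep : pvS5 (pvStepA s c) ∧
        ((pvStepA s c).contains "DM" = (s.contains "DM" || pvIsD c)) ∧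
        ((pvStepA s c).contains "HTN" = (s.contains "HTN" || pvIsH c)) := by
      rcases hs with rfl | rfl | rfl | rfl | rfl <;>
        · unfold pvStepA pvS5 pvIsD pvIsH
          by_cases h1 : (c == "Hypertension" || c == "HTN") = true <;>
            by_cases h2 : (c == "Diabetes" || c == "Diabetes Mellitus Type 2" || c == "DM") = true <;>
              simp_all [PySem.Set.add, PySem.Set.contains]
    have hfold : (c :: t).foldl pvStepA s = t.foldl pvStepA (pvStepA s c) := rfl
    rw [hfold, ih (pvStepA s c) hstep.1, hstep.2.1, hstep.2.2]
    simp [List.any_cons, pvOut, Bool.or_assoc, Bool.or_comm, Bool.or_left_comm]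

-- encoding of the two flags as B's bitmask (HTN = bit 0, DM = bit 1)
def pvEnc (bD bH : Bool) : Int := (if bD then 2 else 0) + (if bH then 1 else 0)

theorem pv_bits_getD (c : String) :
    PySem.Dict.getD pvTagBits c 0 = pvEnc (pvIsD c) (pvIsH c) := by
  have hitems : pvTagBits.items =
      [("Hypertension", 1), ("HTN", 1), ("Diabetes", 2), ("Diabetes Mellitus Type 2", 2), ("DM", 2)] := rfl
  by_cases hmem : c ∈ ["Hypertension", "HTN", "Diabetes", "Diabetes Mellitus Type 2", "DM"]
  · simp only [List.mem_cons, List.not_mem_nil, or_false] at hmem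
    rcases hmem with rfl | rfl | rfl | rfl | rfl <;> rfl
  · obtain ⟨n1, n2, n3, n4, n5⟩ :
        c ≠ "Hypertension" ∧ c ≠ "HTN" ∧ c ≠ "Diabetes" ∧ c ≠ "Diabetes Mellitus Type 2" ∧ c ≠ "DM" := by
      simpa using hmem
    have e1 : ("Hypertension" == c) = false := by simp [beq_eq_false_iff_ne]; exact Ne.symm n1
    have e2 : ("HTN" == c) = false := by simp [beq_eq_false_iff_ne]; exact Ne.symm n2
    have e3 : ("Diabetes" == c) = false := by simp [beq_eq_false_iff_ne]; exact Ne.symm n3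
    have e4 : ("Diabetes Mellitus Type 2" == c) = false := by simp [beq_eq_false_iff_ne]; exact Ne.symm n4
    have e5 : ("DM" == c) = false := by simp [beq_eq_false_iff_ne]; exact Ne.symm n5
    simp [PySem.Dict.getD, PySem.Dict.get?, hitems, List.find?, e1, e2, e3, e4, e5,
      pvIsD, pvIsH, pvEnc, beq_iff_eq, n1, n2, n3, n4, n5]

theorem pv_enc_lor (a b x y : Bool) : PySem.Int.bor (pvEnc a b) (pvEnc x y) = pvEnc (a || x) (b || y) := by
  cases a <;> cases b <;> cases x <;> cases y <;> decide

theorem pv_enc_eq_three (a b : Bool) : (pvEnc a b == 3) = (a && b) := by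
  cases a <;> cases b <;> decide

theorem pv_altLoop_enc : ∀ (l : List String) (bD bH : Bool),
    pvAltLoop l (pvEnc bD bH) = pvEnc (bD || l.any pvIsD) (bH || l.any pvIsH) := by
  intro l
  induction l with
  | nil => intro bD bH; simp [pvAltLoop]
  | cons c t ih =>
    intro bD bH
    show (let mask := PySem.Int.bor (pvEnc bD bH) (PySem.Dict.getD pvTagBits c 0);
          if mask == 3 then mask else pvAltLoop t mask) = _
    simp only [pv_bits_getD, pv_enc_lor, pv_enc_eq_three]
    by_cases h : ((bD || pvIsD c) && (bH || pvIsH c)) = true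
    · obtain ⟨hD, hH⟩ := Bool.and_eq_true_iff.mp h
      simp [List.any_cons, ← Bool.or_assoc, hD, hH, pvEnc]
    · rw [if_neg h, ih]
      simp [List.any_cons, Bool.or_assoc]

theorem pv_out_lookup (bD bH : Bool) :
    (PySem.List.pyGet? pvOUT (pvEnc bD bH)).getD [] = pvOut bD bH := by
  cases bD <;> cases bH <;> decide

theorem pv_alt_eq (conditions : List String) :
    normalize_conditions_alt conditions = pvOut (conditions.any pvIsD) (conditions.any pvIsH) := by
  unfold normalize_conditions_alt
  have h0 : (0 : Int) = pvEnc false false := by decide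
  rw [h0, pv_altLoop_enc, Bool.false_or, Bool.false_or, pv_out_lookup]

-- ===== VERDICT (by name: the statement is the Claim_ definition above) =====
theorem normalize_conditions_spec : Claim_equal_normalize_conditions := by
  intro conditions _
  unfold Spec_normalize_conditions
  have h : PySem.List.sorted (conditions.foldl pvStepA []) (fun x => x) false
      = pvOut ((List.contains [] "DM") || conditions.any pvIsD) ((List.contains [] "HTN") || conditions.any pvIsH) :=
    pv_fold_sorted conditions [] (Or.inl rfl)
  simp only [List.contains_nil, Bool.false_or] at h
  rw [pv_alt_eq]
  exact h
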